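-- pv_equiv track=rewrite | github.com/67070018Chanyaphat/PSCP | Helloooo.py | extend_vowel
-- ===== SOURCE A (Python) =====
-- def extend_vowel(word):
--     """hard to understand"""
--     vowels = "aeiouAEIOU"
--     last_vowel_pos = -1
--
--     # ค้นหาตำแหน่งของสระตัวสุดท้ายโดยใช้ enumerate
--     for i, char in enumerate(word):
--         if char in vowels:
--             last_vowel_pos = i
--
--     # หากเจอสระตัวสุดท้าย
--     if last_vowel_pos != -1:
--         # ลากเสียงด้วยการเพิ่มสระตัวสุดท้ายอีก 3 ตัว
--         word = word[:last_vowel_pos + 1] + word[last_vowel_pos] * 3 + word[last_vowel_pos + 1:]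
--
--     return word
-- ===== SOURCE B (Python) =====
-- def extend_vowel(word):
--     """Reverse scan: splice at the first vowel found from the right."""
--     vowels = "aeiouAEIOU"
--     for i in range(len(word) - 1, -1, -1):
--         c = word[i]
--         if c in vowels:
--             return word[:i + 1] + c * 3 + word[i + 1:]
--     return word
-- ===== Notes on version B (the rewrite author's own statement) =====
-- stated objective: alternative
-- what changed: Replaces A's forward full scan that accumulates the last vowel index (then splices) with a backward scan that returns the spliced word at the first vowel found from the right; early exit helps only when a vowel lies near the end, so no speed is claimed.
import Mathlib
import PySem

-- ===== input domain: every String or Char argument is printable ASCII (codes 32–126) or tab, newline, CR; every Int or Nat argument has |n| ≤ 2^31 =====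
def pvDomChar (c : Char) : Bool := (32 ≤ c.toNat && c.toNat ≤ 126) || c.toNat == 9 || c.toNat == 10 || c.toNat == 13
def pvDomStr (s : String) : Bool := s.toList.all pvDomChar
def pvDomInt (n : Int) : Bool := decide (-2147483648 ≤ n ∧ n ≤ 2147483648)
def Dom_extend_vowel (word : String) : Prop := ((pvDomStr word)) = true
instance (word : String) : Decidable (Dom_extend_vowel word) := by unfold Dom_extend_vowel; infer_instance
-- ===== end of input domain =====

-- B replaces A's forward scan with an index accumulator by a backward scan that exits at
-- the first vowel from the right with an early exit (objective: alternative decomposition).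

-- ===== PORT A =====
-- the vowel membership test 'char in "aeiouAEIOU"'
def pvVowels : List Char := "aeiouAEIOU".toList

-- A's body on the character list: forward scan accumulating last_vowel_pos, then splice
def pvAList (cs : List Char) : List Char :=
  let p := (PySem.List.enumerate cs 0).foldl
    (fun acc ic => if pvVowels.contains ic.2 then ic.1 else acc) (-1)
  if p ≠ -1 then
    PySem.List.slice cs none (some (p + 1))
      ++ (match PySem.List.pyGet? cs p with
          | some c => [c, c, c]
          | none => [])
      ++ PySem.List.slice cs (some (p + 1)) none
  else cs

def extend_vowel (word : String) : String := String.ofList (pvAList word.toList)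

-- ===== PORT B =====
-- B's loop: for i in range(len(word)-1, -1, -1); n+1 means 'next index to try is n'
def pvBList (cs : List Char) : Nat → List Char
  | 0 => cs
  | n + 1 =>
    match PySem.List.pyGet? cs (n : Int) with
    | some c =>
        if pvVowels.contains c then
          PySem.List.slice cs none (some ((n : Int) + 1))
            ++ [c, c, c]
            ++ PySem.List.slice cs (some ((n : Int) + 1)) none
        else pvBList cs n
    | none => pvBList cs n

def extend_vowel_alt (word : String) : String :=
  String.ofList (pvBList word.toList word.toList.length)

-- ===== PRECONDITION & SPEC =====
def Spec_extend_vowel (word : String) (out : String) : Prop := out = extend_vowel_alt word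
instance (word : String) (out : String) : Decidable (Spec_extend_vowel word out) := by unfold Spec_extend_vowel; infer_instance

-- ===== CLAIM (what is proved, stated in full; the proofs are below) =====
def Claim_equal_extend_vowel : Prop := ∀ (word : String), Dom_extend_vowel word → Spec_extend_vowel word (extend_vowel word)

-- ===== LEMMAS AND PROOFS =====

-- A's accumulated index on the list
def pvP (cs : List Char) : Int :=
  (PySem.List.enumerate cs 0).foldl
    (fun acc ic => if pvVowels.contains ic.2 then ic.1 else acc) (-1)

theorem pvP_def (cs : List Char) : pvAList cs =
    (if pvP cs ≠ -1 then
      PySem.List.slice cs none (some (pvP cs + 1))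
        ++ (match PySem.List.pyGet? cs (pvP cs) with
            | some c => [c, c, c]
            | none => [])
        ++ PySem.List.slice cs (some (pvP cs + 1)) none
    else cs) := rfl

theorem pvP_append (cs : List Char) (c : Char) :
    pvP (cs ++ [c]) = if pvVowels.contains c then (cs.length : Int) else pvP cs := by
  simp [pvP, PySem.List.enumerate_append, PySem.List.enumerate_cons, List.foldl_append]

theorem pvP_range (cs : List Char) : pvP cs = -1 ∨ (0 ≤ pvP cs ∧ pvP cs < cs.length) := by
  induction cs using List.reverseRecOn with
  | nil => left; rfl
  | append_singleton xs c ih =>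
      rw [pvP_append]
      by_cases h : pvVowels.contains c
      · right
        rw [if_pos h]
        simp only [List.length_append, List.length_cons, List.length_nil]
        push_cast; omega
      · rw [if_neg h]
        rcases ih with h1 | ⟨h2, h3⟩
        · left; exact h1
        · right
          refine ⟨h2, ?_⟩
          simp only [List.length_append, List.length_cons, List.length_nil]
          push_cast; omega

-- appending a character commutes with B's search over the first cs.length indices
theorem pvBList_append (cs : List Char) (c : Char) :
    ∀ n, n ≤ cs.length → pvBList (cs ++ [c]) n = pvBList cs n ++ [c] := by
  intro n
  induction n with
  | zero => intro _; rfl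
  | succ m ih =>
      intro hle
      have hm : m < cs.length := by omega
      have hget : PySem.List.pyGet? (cs ++ [c]) (m : Int) = some cs[m] := by
        rw [PySem.List.pyGet?_natCast]
        simp [List.getElem?_append_left hm]
      have hget' : PySem.List.pyGet? cs (m : Int) = some cs[m] := by
        rw [PySem.List.pyGet?_natCast]; simp [hm]
      rw [pvBList, pvBList, hget, hget']
      by_cases hv : pvVowels.contains cs[m]
      · have h01 : (0 : Int) ≤ (m : Int) + 1 := by omega
        simp only [hv, if_true]
        rw [PySem.List.slice_to _ h01, PySem.List.slice_to _ h01,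
            PySem.List.slice_from _ h01, PySem.List.slice_from _ h01]
        have htn : ((m : Int) + 1).toNat = m + 1 := by omega
        rw [htn]
        rw [List.take_append_of_le_length (by omega), List.drop_append_of_le_length (by omega)]
        simp [List.append_assoc]
        rw [List.drop_eq_getElem_cons hm]
        rfl
      · simp only [hv]
        exact ih (by omega)

-- appending a non-vowel commutes with A's result
theorem pvAList_append_nonvowel (cs : List Char) (c : Char)
    (hc : pvVowels.contains c = false) :
    pvAList (cs ++ [c]) = pvAList cs ++ [c] := by
  rw [pvP_def, pvP_def, pvP_append, hc]
  simp only [if_false, Bool.false_eq_true]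
  rcases pvP_range cs with h1 | ⟨h2, h3⟩
  · simp [h1]
  · have hne : pvP cs ≠ -1 := by omega
    simp only [hne, if_true, ne_eq, not_false_iff]
    have h01 : (0 : Int) ≤ pvP cs + 1 := by omega
    rw [PySem.List.slice_to _ h01, PySem.List.slice_to _ h01,
        PySem.List.slice_from _ h01, PySem.List.slice_from _ h01]
    have hget : PySem.List.pyGet? (cs ++ [c]) (pvP cs) = PySem.List.pyGet? cs (pvP cs) := by
      rw [PySem.List.pyGet?_of_nonneg _ h2, PySem.List.pyGet?_of_nonneg _ h2]
      have : (pvP cs).toNat < cs.length := by omega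
      simp [List.getElem?_append_left this]
    rw [hget]
    have hlt : (pvP cs + 1).toNat ≤ cs.length := by omega
    rw [List.take_append_of_le_length hlt, List.drop_append_of_le_length hlt]
    simp

theorem pvList_eq (cs : List Char) : pvAList cs = pvBList cs cs.length := by
  induction cs using List.reverseRecOn with
  | nil => rfl
  | append_singleton xs c ih =>
      have hlen : (xs ++ [c]).length = xs.length + 1 := by simp
      rw [hlen, pvBList]
      have hget : PySem.List.pyGet? (xs ++ [c]) (xs.length : Int) = some c :=
        PySem.List.pyGet?_append_length xs [] c
      rw [hget]
      by_cases hv : pvVowels.contains c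
      · simp only [hv, if_true]
        rw [pvP_def, pvP_append, if_pos hv]
        have hne : (xs.length : Int) ≠ -1 := by omega
        rw [if_pos hne, hget]
      · have hv' : pvVowels.contains c = false := by simp only [Bool.not_eq_true] at hv; exact hv
        simp only [hv', Bool.false_eq_true, if_false]
        rw [pvBList_append xs c xs.length (le_refl _),
            pvAList_append_nonvowel xs c hv', ih]

-- ===== VERDICT (by name: the statement is the Claim_ definition above) =====
theorem extend_vowel_spec : Claim_equal_extend_vowel := by
  intro word _
  unfold Spec_extend_vowel extend_vowel extend_vowel_alt
  rw [pvList_eq]
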